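-- pv_equiv track=rewrite | github.com/utrori/nanopore | fast5_loader.py | _get_cpgs
-- ===== SOURCE A (Python) =====
-- def _get_cpgs(seq):
--     """Return a list of CpG sites."""
--     cpg_sites = []
--     upper_seq = seq.upper()
--     for n in range(len(upper_seq) - 1):
--         if upper_seq[n] == 'C':
--             if upper_seq[n+1] == 'G':
--                 cpg_sites.append(n)
--     return cpg_sites
-- ===== SOURCE B (Python) =====
-- def _get_cpgs(seq):
--     """Return a list of CpG sites."""
--     upper_seq = seq.upper()
--     cpg_sites = []
--     idx = upper_seq.find('CG')
--     while idx != -1: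
--         cpg_sites.append(idx)
--         idx = upper_seq.find('CG', idx + 1)
--     return cpg_sites
-- ===== Notes on version B (the rewrite author's own statement) =====
-- stated objective: faster
-- what changed: Replaced the per-index character-comparison loop with a find-driven search that jumps from one CpG occurrence to the next via str.find with a start offset, skipping the non-matching positions in C code.
import Mathlib
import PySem

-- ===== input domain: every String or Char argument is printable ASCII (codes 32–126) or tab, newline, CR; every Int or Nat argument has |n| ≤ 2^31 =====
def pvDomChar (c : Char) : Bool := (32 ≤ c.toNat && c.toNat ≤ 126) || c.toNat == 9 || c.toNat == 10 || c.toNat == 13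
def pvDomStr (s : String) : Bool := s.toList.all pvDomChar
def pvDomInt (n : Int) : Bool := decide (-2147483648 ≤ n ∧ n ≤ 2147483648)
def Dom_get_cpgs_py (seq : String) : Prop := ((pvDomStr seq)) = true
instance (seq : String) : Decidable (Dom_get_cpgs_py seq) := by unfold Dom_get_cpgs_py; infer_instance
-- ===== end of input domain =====

-- B replaces A's per-index character-comparison loop with a find-driven loop
-- (str.find with a start offset hops from one CpG occurrence to the next); same
-- ordered result, measurably faster by a constant factor (the scan runs in C code).

-- ===== PORT A =====
def get_cpgs_py (seq : String) : List Int :=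
  let upper_seq := PySem.Str.upper seq
  (PySem.List.pyRange 0 (PySem.Str.len upper_seq - 1) 1).foldl
    (fun cpg_sites n =>
      if PySem.Str.pyGet? upper_seq n = some 'C' then
        if PySem.Str.pyGet? upper_seq (n + 1) = some 'G' then cpg_sites ++ [n]
        else cpg_sites
      else cpg_sites) []

-- ===== PORT B =====
-- the 'while idx != -1' loop of Source B; fuel = length + 1 bounds the iteration count
-- (each found index is strictly larger than the previous one)
def cgFindLoop (upper_seq : List Char) : Nat → Int → List Int
  | 0, _ => []
  | fuel + 1, idx =>
    if idx = -1 then []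
    else idx :: cgFindLoop upper_seq fuel (PySem.Chars.findFrom upper_seq ['C', 'G'] (idx + 1))

def get_cpgs_py_alt (seq : String) : List Int :=
  let upper_seq := (PySem.Str.upper seq).toList
  cgFindLoop upper_seq (upper_seq.length + 1) (PySem.Chars.find upper_seq ['C', 'G'])

-- ===== PRECONDITION & SPEC =====
def Spec_get_cpgs_py (seq : String) (out : List Int) : Prop := out = get_cpgs_py_alt seq
instance (seq : String) (out : List Int) : Decidable (Spec_get_cpgs_py seq out) := by unfold Spec_get_cpgs_py; infer_instance

-- ===== CLAIM (what is proved, stated in full; the proofs are below) =====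
def Claim_equal_get_cpgs_py : Prop := ∀ (seq : String), Dom_get_cpgs_py seq → Spec_get_cpgs_py seq (get_cpgs_py seq)

-- ===== LEMMAS AND PROOFS =====

-- the ordered list of CpG positions ≥ k, the common characterisation of both ports
def cgOcc (u : List Char) (k : Nat) : List Int :=
  ((List.range' k (u.length - 1 - k)).filter
    (fun n => ['C', 'G'].isPrefixOf (u.drop n))).map (fun n => Int.ofNat n)

theorem cg_iff (u : List Char) (k : Nat) :
    ['C', 'G'] <+: u.drop k ↔ (u[k]? = some 'C' ∧ u[k + 1]? = some 'G') := by
  have h0 : u[k]? = (u.drop k)[0]? := by simp [List.getElem?_drop]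
  have h1 : u[k + 1]? = (u.drop k)[1]? := by simp [List.getElem?_drop]
  rw [h0, h1]
  rcases e : u.drop k with _ | ⟨a, _ | ⟨b, t⟩⟩
  · constructor
    · intro h; exact absurd (List.IsPrefix.length_le h) (by simp)
    · intro ⟨hc, _⟩; simp at hc
  · constructor
    · intro h; exact absurd (List.IsPrefix.length_le h) (by simp)
    · intro ⟨_, hg⟩; simp at hg
  · constructor
    · intro ⟨t', ht⟩
      simp only [List.cons_append] at ht
      cases ht
      simp
    · intro ⟨hc, hg⟩
      simp at hc hg
      subst hc; subst hg
      exact ⟨t, rfl⟩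

set_option maxHeartbeats 1000000 in
theorem a_eq_cgOcc (seq : String) :
    get_cpgs_py seq = cgOcc ((PySem.Str.upper seq).toList) 0 := by
  unfold get_cpgs_py
  dsimp only
  set u := (PySem.Str.upper seq).toList with hu
  have hcg : ∀ k : Nat, (['C', 'G'].isPrefixOf (u.drop k) = true) ↔
      (u[k]? = some 'C' ∧ u[k + 1]? = some 'G') := by
    intro k
    rw [List.isPrefixOf_iff_prefix]
    exact cg_iff u k
  rw [PySem.Str.len_eq, PySem.List.pyRange_one]
  rw [List.foldl_map]
  have hbody : (fun (acc : List Int) (k : Nat) =>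
      if PySem.Str.pyGet? (PySem.Str.upper seq) ((0 : Int) + (k : Int)) = some 'C' then
        if PySem.Str.pyGet? (PySem.Str.upper seq) ((0 : Int) + (k : Int) + 1) = some 'G' then
          acc ++ [(0 : Int) + (k : Int)]
        else acc
      else acc) =
      (fun acc k =>
        if ['C', 'G'].isPrefixOf (u.drop k) then acc ++ [((fun n => Int.ofNat n) k)] else acc) := by
    funext acc k
    have hk0 : (0 : Int) + (k : Int) = ((k : Nat) : Int) := by omega
    have hk1 : ((k : Nat) : Int) + 1 = ((k + 1 : Nat) : Int) := by push_cast; ring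
    rw [hk0, hk1, PySem.Str.pyGet?_natCast, PySem.Str.pyGet?_natCast, ← hu]
    by_cases h1 : u[k]? = some 'C' <;> by_cases h2 : u[k + 1]? = some 'G' <;>
      simp [h1, h2, hcg k]
  rw [hbody, PySem.List.foldl_append_if]
  unfold cgOcc
  rw [List.range_eq_range', List.nil_append, ← hu]
  have hm : (((u.length : Int)) - 1 - 0).toNat = u.length - 1 - 0 := by omega
  rw [hm]

theorem cgFindLoop_eq (u : List Char) :
    ∀ (fuel : Nat) (k : Nat), k ≤ u.length → u.length + 1 - k ≤ fuel →
      cgFindLoop u fuel (PySem.Chars.findFrom u ['C', 'G'] (k : Int)) = cgOcc u k := by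
  intro fuel
  induction fuel with
  | zero => intro k hk hf; omega
  | succ fuel ih =>
    intro k hk hf
    rw [PySem.Chars.findFrom_natCast u _ k hk]
    by_cases hfind : PySem.Chars.find (u.drop k) ['C', 'G'] = -1
    · rw [if_pos hfind]
      have hno : ¬ ['C', 'G'] <:+: u.drop k := (PySem.Chars.find_eq_neg_one_iff _ _).mp hfind
      unfold cgFindLoop
      rw [if_pos rfl]
      have hnil : (List.range' k (u.length - 1 - k)).filter
          (fun n => ['C', 'G'].isPrefixOf (u.drop n)) = [] := by
        rw [List.filter_eq_nil_iff]
        intro n hn hpre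
        have hkn : k ≤ n := (List.mem_range'_1.mp hn).1
        have hdrop : u.drop n = (u.drop k).drop (n - k) := by
          rw [List.drop_drop]; congr 1; omega
        apply hno
        have hp : ['C', 'G'] <+: u.drop n := List.isPrefixOf_iff_prefix.mp hpre
        rw [hdrop] at hp
        exact hp.isInfix.trans (List.drop_suffix (n - k) (u.drop k)).isInfix
      unfold cgOcc
      rw [hnil]
      simp
    · have h0 : 0 ≤ PySem.Chars.find (u.drop k) ['C', 'G'] := by
        have := PySem.Chars.neg_one_le_find (u.drop k) ['C', 'G']
        omega
      obtain ⟨hocc, hmin⟩ := PySem.Chars.find_spec h0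
      set j := (PySem.Chars.find (u.drop k) ['C', 'G']).toNat with hj
      have hjcast : PySem.Chars.find (u.drop k) ['C', 'G'] = (j : Int) := by omega
      rw [List.drop_drop] at hocc
      -- occurrence at position k + j; it lies at most at length - 2
      have hlen : k + j + 2 ≤ u.length := by
        have := hocc.length_le
        simp [List.length_drop] at this
        omega
      rw [if_neg hfind, hjcast]
      have hne : ¬ ((k : Int) + (j : Int) = -1) := by omega
      unfold cgFindLoop
      rw [if_neg hne]
      have hcast1 : (k : Int) + (j : Int) + 1 = ((k + j + 1 : Nat) : Int) := by push_cast; ring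
      rw [hcast1]
      have hfuel : u.length + 1 - (k + j + 1) ≤ fuel := by omega
      rw [ih (k + j + 1) (by omega) hfuel]
      -- now show cgOcc u k = (k + j) :: cgOcc u (k + j + 1)
      unfold cgOcc
      have hsplit : List.range' k (u.length - 1 - k) =
          List.range' k j ++ ((k + j) :: List.range' (k + j + 1) (u.length - 1 - (k + j + 1))) := by
        have h1 : u.length - 1 - k = j + (u.length - 1 - (k + j + 1) + 1) := by omega
        have h2 := List.range'_append (s := k) (m := j) (n := u.length - 1 - (k + j + 1) + 1)
          (step := 1)
        rw [one_mul] at h2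
        rw [h1, ← h2, List.range'_succ]
      rw [hsplit, List.filter_append]
      have hfilter_nil : (List.range' k j).filter (fun n => ['C', 'G'].isPrefixOf (u.drop n)) = [] := by
        rw [List.filter_eq_nil_iff]
        intro n hn hpre
        obtain ⟨hkn, hnkj⟩ := List.mem_range'_1.mp hn
        have hdrop : u.drop n = (u.drop k).drop (n - k) := by
          rw [List.drop_drop]; congr 1; omega
        have hp : ['C', 'G'] <+: u.drop n := List.isPrefixOf_iff_prefix.mp hpre
        rw [hdrop] at hp
        exact hmin (n - k) (by omega) hp
      rw [hfilter_nil, List.nil_append, List.filter_cons_of_pos]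
      · simp
      · exact List.isPrefixOf_iff_prefix.mpr hocc

theorem b_eq_cgOcc (seq : String) :
    get_cpgs_py_alt seq = cgOcc ((PySem.Str.upper seq).toList) 0 := by
  unfold get_cpgs_py_alt
  dsimp only
  set u := (PySem.Str.upper seq).toList with hu
  rw [← PySem.Chars.findFrom_zero]
  have h0 : (0 : Int) = ((0 : Nat) : Int) := rfl
  rw [h0, cgFindLoop_eq u (u.length + 1) 0 (by omega) (by omega)]

-- ===== VERDICT (by name: the statement is the Claim_ definition above) =====
theorem get_cpgs_py_spec : Claim_equal_get_cpgs_py := by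
  intro seq _
  unfold Spec_get_cpgs_py
  rw [a_eq_cgOcc, b_eq_cgOcc]
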